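-- pv_equiv track=rewrite | github.com/kel-z/HSR-Data | src/main.py | _get_stable_hash
-- ===== SOURCE A (Python) =====
-- def _get_stable_hash(s):
--     """Get a stable hash of a string.
--
--     :param s: The string to hash.
--     :return: A stable hash of the string.
--     """
--     hash1 = 5381
--     hash2 = hash1
--     max_int = 2**31 - 1  # Maximum representable positive integer in C#
--
--     for i in range(0, len(s), 2):
--         hash1 = (((hash1 << 5) + hash1) ^ ord(s[i])) & 0xFFFFFFFF
--         if i < len(s) - 1:  # additional string characters available
--             hash2 = (((hash2 << 5) + hash2) ^ ord(s[i + 1])) & 0xFFFFFFFF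
--
--     hash_val = (hash1 + (hash2 * 1566083941)) & 0xFFFFFFFF
--
--     # adjust for max signed int32 value
--     return str(hash_val if hash_val <= max_int else hash_val - 2**32)
-- ===== SOURCE B (Python) =====
-- def _get_stable_hash(s):
--     """Two-pass variant: fold hash1 over the even-indexed slice and hash2
--     over the odd-indexed slice; the odd-length guard disappears."""
--     MASK = 0xFFFFFFFF
--     hash1 = 5381
--     for c in s[0::2]:
--         hash1 = (((hash1 << 5) + hash1) ^ ord(c)) & MASK
--     hash2 = 5381
--     for c in s[1::2]:
--         hash2 = (((hash2 << 5) + hash2) ^ ord(c)) & MASK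
--     hash_val = (hash1 + hash2 * 1566083941) & MASK
--     return str(hash_val - 2**32 if hash_val > 2**31 - 1 else hash_val)
-- ===== Notes on version B (the rewrite author's own statement) =====
-- stated objective: alternative
-- what changed: Replaces the single stride-2 indexed loop with its in-loop bounds check by two independent folds over the even- and odd-indexed slices, removing the odd-length guard.
import Mathlib
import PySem

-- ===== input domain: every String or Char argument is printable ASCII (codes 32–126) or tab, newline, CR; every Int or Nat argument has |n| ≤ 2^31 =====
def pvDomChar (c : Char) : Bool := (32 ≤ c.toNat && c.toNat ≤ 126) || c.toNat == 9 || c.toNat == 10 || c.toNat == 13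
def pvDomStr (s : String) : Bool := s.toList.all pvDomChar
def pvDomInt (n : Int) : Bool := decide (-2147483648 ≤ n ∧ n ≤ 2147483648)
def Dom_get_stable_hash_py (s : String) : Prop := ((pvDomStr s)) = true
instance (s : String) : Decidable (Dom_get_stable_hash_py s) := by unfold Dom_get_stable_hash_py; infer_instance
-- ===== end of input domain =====

-- B replaces A's single stride-2 indexed loop (with its odd-length guard) by two
-- independent folds over the even- and odd-indexed slices; same cost, plainer loops.

-- ===== PORT A =====
-- one update step of A's loop body: (((h << 5) + h) ^ ord(c)) & 0xFFFFFFFF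
def hashStepA (h : Nat) (c : Char) : Nat := (((h <<< 5) + h) ^^^ c.toNat) % 4294967296

-- A's 'for i in range(0, len(s), 2)' loop: consumes two characters per iteration;
-- the single-character case is exactly the 'i < len(s) - 1' guard failing.
def loopA : List Char → Nat → Nat → Nat × Nat
  | [], h1, h2 => (h1, h2)
  | [c], h1, h2 => (hashStepA h1 c, h2)
  | c1 :: c2 :: rest, h1, h2 => loopA rest (hashStepA h1 c1) (hashStepA h2 c2)

def get_stable_hash_py (s : String) : String :=
  let p := loopA s.toList 5381 5381
  let hash_val := (p.1 + p.2 * 1566083941) % 4294967296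
  PySem.Int.toStr (if hash_val ≤ 2147483647 then (hash_val : Int) else (hash_val : Int) - 4294967296)

-- ===== PORT B =====
def hashStepB (h : Nat) (c : Char) : Nat := (((h <<< 5) + h) ^^^ c.toNat) % 4294967296

-- s[0::2] and s[1::2], ported by hand (exact for these step-2 slices of a full string)
def evenSlice : List Char → List Char
  | [] => []
  | [c] => [c]
  | c :: _ :: rest => c :: evenSlice rest

def oddSlice : List Char → List Char
  | [] => []
  | _ :: rest => evenSlice rest

def get_stable_hash_py_alt (s : String) : String :=
  let hash1 := (evenSlice s.toList).foldl hashStepB 5381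
  let hash2 := (oddSlice s.toList).foldl hashStepB 5381
  let hash_val := (hash1 + hash2 * 1566083941) % 4294967296
  PySem.Int.toStr (if hash_val > 2147483647 then (hash_val : Int) - 4294967296 else (hash_val : Int))

-- ===== PRECONDITION & SPEC =====
def Spec_get_stable_hash_py (s : String) (out : String) : Prop := out = get_stable_hash_py_alt s
instance (s : String) (out : String) : Decidable (Spec_get_stable_hash_py s out) := by unfold Spec_get_stable_hash_py; infer_instance

-- ===== CLAIM (what is proved, stated in full; the proofs are below) =====
def Claim_equal_get_stable_hash_py : Prop := ∀ (s : String), Dom_get_stable_hash_py s → Spec_get_stable_hash_py s (get_stable_hash_py s)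

-- ===== LEMMAS AND PROOFS =====

-- A's interleaved two-at-a-time loop computes exactly the two parity folds
theorem oddSlice_cons (c : Char) (l : List Char) : oddSlice (c :: l) = evenSlice l := rfl

theorem evenSlice_cons (c : Char) (l : List Char) : evenSlice (c :: l) = c :: oddSlice l := by
  cases l <;> simp [evenSlice, oddSlice]

theorem loopA_eq_folds (l : List Char) (h1 h2 : Nat) :
    loopA l h1 h2 = ((evenSlice l).foldl hashStepB h1, (oddSlice l).foldl hashStepB h2) := by
  induction l, h1, h2 using loopA.induct with
  | case1 h1 h2 => simp [loopA, evenSlice, oddSlice]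
  | case2 c h1 h2 => simp [loopA, evenSlice, oddSlice, hashStepA, hashStepB]
  | case3 c1 c2 rest h1 h2 ih =>
      simp only [loopA, evenSlice_cons, oddSlice_cons, List.foldl_cons]
      simpa [hashStepA, hashStepB] using ih

-- ===== VERDICT (by name: the statement is the Claim_ definition above) =====
theorem get_stable_hash_py_spec : Claim_equal_get_stable_hash_py := by
  intro s _
  unfold Spec_get_stable_hash_py get_stable_hash_py get_stable_hash_py_alt
  rw [loopA_eq_folds]
  set hv := ((evenSlice s.toList).foldl hashStepB 5381 +
      (oddSlice s.toList).foldl hashStepB 5381 * 1566083941) % 4294967296 with hhv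
  simp only []
  split <;> split <;> first | rfl | (exfalso; omega)
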